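-- pv_equiv track=rewrite | github.com/dynokiller/AAD- | Practical 1/Q2.py | find_closest_sum_pair
-- ===== SOURCE A (Python) =====
-- def find_closest_sum_pair(arr):
--     arr.sort()
--     left, right = 0, len(arr) - 1
--     closest_pair = (arr[left], arr[right])
--     min_sum = arr[left] + arr[right]
--
--     while left < right:
--         current_sum = arr[left] + arr[right]
--
--         if abs(current_sum) < abs(min_sum):
--             min_sum = current_sum
--             closest_pair = (arr[left], arr[right])
--
--         if current_sum < 0:
--             left += 1
--         else:
--             right -= 1
--
--     return closest_pair
-- ===== SOURCE B (Python) =====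
-- def find_closest_sum_pair(arr):
--     arr.sort()
--     n = len(arr)
--     best = (arr[0], arr[n - 1])
--     m = arr[0] + arr[n - 1]
--     for i in range(n - 1):
--         j = n - 1
--         while j > i:
--             s = arr[i] + arr[j]
--             if abs(s) < abs(m):
--                 m = s
--                 best = (arr[i], arr[j])
--             j -= 1
--     return best
-- ===== Notes on version B (the rewrite author's own statement) =====
-- stated objective: alternative
-- what changed: Replaces the two-pointer sweep by an exhaustive all-pairs scan (i ascending, j descending) with strict-improvement updates; this scan order provably selects the same pair as the sweep, ties included.
import Mathlib
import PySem

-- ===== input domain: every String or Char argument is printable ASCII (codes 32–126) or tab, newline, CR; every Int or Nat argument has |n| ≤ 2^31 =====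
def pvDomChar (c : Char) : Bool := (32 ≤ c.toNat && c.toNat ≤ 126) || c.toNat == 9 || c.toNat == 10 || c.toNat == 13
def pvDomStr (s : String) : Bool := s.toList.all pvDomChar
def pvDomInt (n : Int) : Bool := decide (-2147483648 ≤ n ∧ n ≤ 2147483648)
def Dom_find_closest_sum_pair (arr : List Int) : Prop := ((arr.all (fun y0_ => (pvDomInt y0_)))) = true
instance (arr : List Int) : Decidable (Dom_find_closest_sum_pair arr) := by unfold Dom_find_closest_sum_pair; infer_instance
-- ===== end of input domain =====

-- B replaces A's two-pointer sweep by an exhaustive all-pairs scan (i ascending, j descending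
-- within each i) with strict-improvement updates; same return value, including tie-breaking.
-- Both A and B sort arr in place (caller-visible mutation is identical); the equivalence proved
-- here is about the return value.

-- ===== PORT A =====
-- the while-loop of A: state (min_sum, closest_pair), pointers l < r walk inward
def fcspLoop (s : List Int) (l r : Nat) (minS : Int) (cp : Int × Int) : Int × Int :=
  if h : l < r then
    let cur := s.getD l 0 + s.getD r 0
    let st := if cur.natAbs < minS.natAbs then (cur, (s.getD l 0, s.getD r 0)) else (minS, cp)
    if cur < 0 then fcspLoop s (l + 1) r st.1 st.2 else fcspLoop s l (r - 1) st.1 st.2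
  else cp
termination_by r - l
decreasing_by all_goals omega

def find_closest_sum_pair (arr : List Int) : Int × Int :=
  let s := PySem.List.sorted arr (fun x => x) false
  let r := s.length - 1
  fcspLoop s 0 r (s.getD 0 0 + s.getD r 0) (s.getD 0 0, s.getD r 0)

-- ===== PORT B =====
-- the inner while-loop of B: j walks down from n-1 to i+1
def fcspInner (s : List Int) (i j : Nat) (st : Int × (Int × Int)) : Int × (Int × Int) :=
  if _h : i < j then
    let v := s.getD i 0 + s.getD j 0
    let st' := if v.natAbs < st.1.natAbs then (v, (s.getD i 0, s.getD j 0)) else st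
    fcspInner s i (j - 1) st'
  else st
termination_by j

def find_closest_sum_pair_alt (arr : List Int) : Int × Int :=
  let s := PySem.List.sorted arr (fun x => x) false
  let n := s.length
  ((List.range (n - 1)).foldl (fun st i => fcspInner s i (n - 1) st)
    (s.getD 0 0 + s.getD (n - 1) 0, (s.getD 0 0, s.getD (n - 1) 0))).2

-- ===== PRECONDITION & SPEC =====
-- Pre_ excludes only the empty list, on which A raises IndexError (arr[-1]).
def Pre_find_closest_sum_pair (arr : List Int) : Prop := arr ≠ []
instance (arr : List Int) : Decidable (Pre_find_closest_sum_pair arr) := by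
  unfold Pre_find_closest_sum_pair; infer_instance

def pvWitness_find_closest_sum_pair : List Int := [3, -5, 2, 8]

def Spec_find_closest_sum_pair (arr : List Int) (out : Int × Int) : Prop := out = find_closest_sum_pair_alt arr
instance (arr : List Int) (out : Int × Int) : Decidable (Spec_find_closest_sum_pair arr out) := by
  unfold Spec_find_closest_sum_pair; infer_instance

-- ===== CLAIM (what is proved, stated in full; the proofs are below) =====
def Claim_equal_find_closest_sum_pair : Prop := ∀ (arr : List Int), Dom_find_closest_sum_pair arr → Pre_find_closest_sum_pair arr → Spec_find_closest_sum_pair arr (find_closest_sum_pair arr)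

-- ===== LEMMAS AND PROOFS =====

-- |s[i] + s[j]| as a Nat, for an index pair
def pvA (s : List Int) (p : Nat × Nat) : Nat := (s.getD p.1 0 + s.getD p.2 0).natAbs

-- the common update step of both loops, as a fold step over index pairs
def pvStep (s : List Int) (st : Int × (Int × Int)) (p : Nat × Nat) : Int × (Int × Int) :=
  let v := s.getD p.1 0 + s.getD p.2 0
  if v.natAbs < st.1.natAbs then (v, (s.getD p.1 0, s.getD p.2 0)) else st

-- the sequence of index pairs A's sweep visits
def pvPath (s : List Int) (l r : Nat) : List (Nat × Nat) :=
  if h : l < r then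
    (l, r) :: (if s.getD l 0 + s.getD r 0 < 0 then pvPath s (l + 1) r else pvPath s l (r - 1))
  else []
termination_by r - l
decreasing_by all_goals omega

-- the sequence of index pairs B visits: i ascending, j descending
def pvDesc (i j : Nat) : List (Nat × Nat) :=
  if _h : i < j then (i, j) :: pvDesc i (j - 1) else []
termination_by j

def pvIjd (n i : Nat) : List (Nat × Nat) :=
  if _h : i < n - 1 then pvDesc i (n - 1) ++ pvIjd n (i + 1) else []
termination_by n - 1 - i

theorem fold_no_update (s : List Int) (L : List (Nat × Nat)) (st : Int × (Int × Int))
    (h : ∀ q ∈ L, st.1.natAbs ≤ pvA s q) : L.foldl (pvStep s) st = st := by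
  induction L with
  | nil => rfl
  | cons a t ih =>
    have ha : st.1.natAbs ≤ (s.getD a.1 0 + s.getD a.2 0).natAbs := h a (by simp)
    simp only [List.foldl_cons, pvStep]
    rw [if_neg (Nat.not_lt.2 ha)]
    exact ih (fun q hq => h q (by simp [hq]))

theorem fold_gt_invariant (s : List Int) (L : List (Nat × Nat)) (st : Int × (Int × Int)) (M : Nat)
    (h : ∀ q ∈ L, M < pvA s q) (h0 : M < st.1.natAbs) :
    M < (L.foldl (pvStep s) st).1.natAbs := by
  induction L generalizing st with
  | nil => exact h0
  | cons a t ih =>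
    simp only [List.foldl_cons, pvStep]
    split
    · exact ih _ (fun q hq => h q (by simp [hq])) (h a (by simp))
    · exact ih _ (fun q hq => h q (by simp [hq])) h0

theorem fold_firstmin (s : List Int) (L1 L2 : List (Nat × Nat)) (P : Nat × Nat)
    (st : Int × (Int × Int)) (h1 : ∀ q ∈ L1, pvA s P < pvA s q) (h0 : pvA s P < st.1.natAbs)
    (h2 : ∀ q ∈ L2, pvA s P ≤ pvA s q) :
    (L1 ++ P :: L2).foldl (pvStep s) st
      = (s.getD P.1 0 + s.getD P.2 0, (s.getD P.1 0, s.getD P.2 0)) := by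
  rw [List.foldl_append]
  have hinv := fold_gt_invariant s L1 st (pvA s P) h1 h0
  simp only [List.foldl_cons]
  rw [show pvStep s (L1.foldl (pvStep s) st) P
      = (s.getD P.1 0 + s.getD P.2 0, (s.getD P.1 0, s.getD P.2 0)) by
    simp only [pvStep]; rw [if_pos]; exact hinv]
  exact fold_no_update s L2 _ (fun q hq => by simpa [pvA] using h2 q hq)

theorem firstmin_exists (s : List Int) (L : List (Nat × Nat)) (hL : L ≠ []) :
    ∃ L1 P L2, L = L1 ++ P :: L2 ∧ (∀ q ∈ L, pvA s P ≤ pvA s q) ∧ ∀ q ∈ L1, pvA s P < pvA s q := by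
  induction L with
  | nil => exact absurd rfl hL
  | cons a t ih =>
    rcases t.eq_nil_or_concat' with rfl | hne
    · exact ⟨[], a, [], by simp⟩
    · have hne' : t ≠ [] := by rcases hne with ⟨_, _, rfl⟩; simp
      obtain ⟨L1, P, L2, heq, hmin, hpre⟩ := ih hne'
      by_cases hc : pvA s a ≤ pvA s P
      · refine ⟨[], a, t, by simp, ?_, by simp⟩
        intro q hq
        rcases List.mem_cons.1 hq with rfl | hq
        · exact le_refl _
        · exact le_trans hc (hmin q hq)
      · refine ⟨a :: L1, P, L2, by simp [heq], ?_, ?_⟩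
        · intro q hq
          rcases List.mem_cons.1 hq with rfl | hq
          · omega
          · exact hmin q hq
        · intro q hq
          rcases List.mem_cons.1 hq with rfl | hq
          · omega
          · exact hpre q hq

theorem fcspLoop_eq_fold (s : List Int) (l r : Nat) (m : Int) (c : Int × Int) :
    fcspLoop s l r m c = ((pvPath s l r).foldl (pvStep s) (m, c)).2 := by
  induction l, r using pvPath.induct s generalizing m c with
  | case1 l r h ih1 ih2 =>
    rw [fcspLoop, pvPath]
    simp only [dif_pos h, List.foldl_cons]
    by_cases hneg : s.getD l 0 + s.getD r 0 < 0
    · rw [if_pos hneg, if_pos hneg, ih1]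
      simp only [Prod.mk.eta, pvStep]
    · rw [if_neg hneg, if_neg hneg, ih2]
      simp only [Prod.mk.eta, pvStep]
  | case2 l r h =>
    rw [fcspLoop, pvPath]; simp [h]

theorem fcspInner_eq_fold (s : List Int) (i j : Nat) (st : Int × (Int × Int)) :
    fcspInner s i j st = (pvDesc i j).foldl (pvStep s) st := by
  induction j using pvDesc.induct i generalizing st with
  | case1 j h ih =>
    rw [fcspInner, pvDesc]
    simp only [dif_pos h, List.foldl_cons, pvStep]
    exact ih _
  | case2 j h =>
    rw [fcspInner, pvDesc]; simp [h]

theorem alt_eq_fold (s : List Int) (st : Int × (Int × Int)) (k : Nat) :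
    (List.range' k (s.length - 1 - k)).foldl (fun st i => fcspInner s i (s.length - 1) st) st
      = (pvIjd s.length k).foldl (pvStep s) st := by
  induction k using pvIjd.induct s.length generalizing st with
  | case1 i h ih =>
    rw [pvIjd]
    simp only [dif_pos h]
    rw [show s.length - 1 - i = (s.length - 1 - (i+1)) + 1 by omega, List.range'_succ,
      List.foldl_cons, List.foldl_append]
    rw [ih, fcspInner_eq_fold]
  | case2 i h =>
    rw [pvIjd]
    simp [dif_neg h, show s.length - 1 - i = 0 by omega]
theorem mem_pvPath (s : List Int) (l r : Nat) (p : Nat × Nat) (hp : p ∈ pvPath s l r) :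
    l ≤ p.1 ∧ p.1 < p.2 ∧ p.2 ≤ r := by
  induction l, r using pvPath.induct s with
  | case1 l r h ih1 ih2 =>
    rw [pvPath] at hp
    simp only [dif_pos h] at hp
    rcases List.mem_cons.1 hp with rfl | hp
    · omega
    · split at hp
      · have := ih1 hp; omega
      · have := ih2 hp; omega
  | case2 l r h =>
    rw [pvPath] at hp; simp [h] at hp

theorem mem_pvDesc (i j : Nat) (p : Nat × Nat) : p ∈ pvDesc i j ↔ p.1 = i ∧ i < p.2 ∧ p.2 ≤ j := by
  induction j using pvDesc.induct i with
  | case1 j h ih =>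
    rw [pvDesc]
    simp only [dif_pos h, List.mem_cons, ih]
    constructor
    · rintro (rfl | ⟨rfl, h2, h3⟩) <;> omega
    · rintro ⟨rfl, h2, h3⟩
      by_cases hj : p.2 = j
      · left; rw [← hj]
      · right; omega
  | case2 j h =>
    rw [pvDesc]
    simp only [dif_neg h, List.not_mem_nil, false_iff]
    omega

theorem mem_pvIjd (n i : Nat) (p : Nat × Nat) :
    p ∈ pvIjd n i ↔ i ≤ p.1 ∧ p.1 < p.2 ∧ p.2 ≤ n - 1 := by
  induction i using pvIjd.induct n with
  | case1 i h ih =>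
    rw [pvIjd]
    simp only [dif_pos h, List.mem_append, mem_pvDesc, ih]
    constructor
    · rintro (⟨rfl, h2, h3⟩ | ⟨h1, h2, h3⟩) <;> omega
    · rintro ⟨h1, h2, h3⟩
      by_cases hi : p.1 = i
      · left; omega
      · right; omega
  | case2 i h =>
    rw [pvIjd]
    simp only [dif_neg h, List.not_mem_nil, false_iff]
    omega

def pvLT (p q : Nat × Nat) : Prop := p.1 < q.1 ∨ (p.1 = q.1 ∧ q.2 < p.2)

theorem pairwise_pvDesc (i j : Nat) : (pvDesc i j).Pairwise pvLT := by
  induction j using pvDesc.induct i with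
  | case1 j h ih =>
    rw [pvDesc]
    simp only [dif_pos h, List.pairwise_cons]
    refine ⟨fun q hq => ?_, ih⟩
    have := (mem_pvDesc i (j-1) q).1 hq
    exact Or.inr (by omega)
  | case2 j h => rw [pvDesc]; simp [dif_neg h]

theorem pairwise_pvIjd (n i : Nat) : (pvIjd n i).Pairwise pvLT := by
  induction i using pvIjd.induct n with
  | case1 i h ih =>
    rw [pvIjd]
    simp only [dif_pos h]
    refine List.pairwise_append.2 ⟨pairwise_pvDesc _ _, ih, ?_⟩
    intro a ha b hb
    have h1 := (mem_pvDesc _ _ a).1 ha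
    have h2 := (mem_pvIjd _ _ b).1 hb
    exact Or.inl (by omega)
  | case2 i h => rw [pvIjd]; simp [dif_neg h]
theorem sorted_getD_mono' (s : List Int) (hs : s.Pairwise (· ≤ ·)) (i j : Nat)
    (hij : i ≤ j) (hj : j < s.length) : s.getD i 0 ≤ s.getD j 0 := by
  rcases Nat.eq_or_lt_of_le hij with rfl | hlt
  · exact le_refl _
  · have := List.pairwise_iff_getElem.1 hs i j (by omega) hj hlt
    simpa [List.getD_eq_getElem?_getD, List.getElem?_eq_getElem, hj, show i < s.length by omega]
      using this

theorem tiebreak (s : List Int) (hs : s.Pairwise (· ≤ ·)) (P : Nat × Nat) (hP : P.1 < P.2)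
    (l r : Nat) :
    l ≤ P.1 → P.2 ≤ r → r ≤ s.length - 1 → 2 ≤ s.length →
    (∀ q : Nat × Nat, l ≤ q.1 → q.1 < q.2 → q.2 ≤ r → pvA s P ≤ pvA s q) →
    (∀ q : Nat × Nat, l ≤ q.1 → q.1 < q.2 → q.2 ≤ r → pvLT q P → pvA s P < pvA s q) →
    ∃ L1 L2, pvPath s l r = L1 ++ P :: L2 ∧ ∀ q ∈ L1, pvA s P < pvA s q := by
  induction l, r using pvPath.induct s with
  | case1 l r h ih1 ih2 =>
    intro hl hr hlen h2len hmin hfirst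
    rw [pvPath]
    simp only [dif_pos h]
    by_cases hPeq : P = (l, r)
    · exact ⟨[], _, by rw [hPeq]; rfl, by simp⟩
    · have hlt : pvLT (l, r) P := by
        have : ¬(P.1 = l ∧ P.2 = r) := fun hc => hPeq (Prod.ext hc.1 hc.2)
        unfold pvLT; omega
      have hlr_gt : pvA s P < pvA s (l, r) := hfirst (l, r) (le_refl l) h (le_refl r) hlt
      have hrlen : r < s.length := by omega
      by_cases hneg : s.getD l 0 + s.getD r 0 < 0
      · rw [if_pos hneg]
        have hPl : l + 1 ≤ P.1 := by
          rcases Nat.lt_or_ge l P.1 with h' | h'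
          · omega
          · exfalso
            have hP1 : P.1 = l := by omega
            have hP2 : P.2 < r := by unfold pvLT at hlt; omega
            have hle : s.getD P.1 0 + s.getD P.2 0 ≤ s.getD l 0 + s.getD r 0 := by
              have := sorted_getD_mono' s hs P.2 r (by omega) hrlen
              rw [hP1]; omega
            have : pvA s (l, r) ≤ pvA s P := by
              unfold pvA; simp only; omega
            omega
        obtain ⟨L1, L2, heq, hpre⟩ := ih1 hPl hr hlen h2len
          (fun q h1 h2 h3 => hmin q (by omega) h2 h3)
          (fun q h1 h2 h3 h4 => hfirst q (by omega) h2 h3 h4)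
        exact ⟨(l, r) :: L1, L2, by rw [heq, List.cons_append], by
          rintro q hq
          rcases List.mem_cons.1 hq with rfl | hq
          · exact hlr_gt
          · exact hpre q hq⟩
      · rw [if_neg hneg]
        have hPr : P.2 ≤ r - 1 := by
          rcases Nat.lt_or_ge P.2 r with h' | h'
          · omega
          · exfalso
            have hP2 : P.2 = r := by omega
            have hP1 : l < P.1 := by unfold pvLT at hlt; omega
            have hle : s.getD l 0 + s.getD r 0 ≤ s.getD P.1 0 + s.getD P.2 0 := by
              have := sorted_getD_mono' s hs l P.1 (by omega) (by omega)
              rw [hP2]; omega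
            have : pvA s (l, r) ≤ pvA s P := by
              unfold pvA; simp only; omega
            omega
        obtain ⟨L1, L2, heq, hpre⟩ := ih2 hl hPr (by omega) h2len
          (fun q h1 h2 h3 => hmin q h1 h2 (by omega))
          (fun q h1 h2 h3 h4 => hfirst q h1 h2 (by omega) h4)
        exact ⟨(l, r) :: L1, L2, by rw [heq, List.cons_append], by
          rintro q hq
          rcases List.mem_cons.1 hq with rfl | hq
          · exact hlr_gt
          · exact hpre q hq⟩
  | case2 l r h =>
    intro hl hr _ _ _ _
    omega
theorem main_sorted (s : List Int) (hs : s.Pairwise (· ≤ ·)) :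
    fcspLoop s 0 (s.length - 1) (s.getD 0 0 + s.getD (s.length - 1) 0)
        (s.getD 0 0, s.getD (s.length - 1) 0)
      = ((List.range (s.length - 1)).foldl (fun st i => fcspInner s i (s.length - 1) st)
          (s.getD 0 0 + s.getD (s.length - 1) 0, (s.getD 0 0, s.getD (s.length - 1) 0))).2 := by
  by_cases h2 : s.length ≤ 1
  · have h0 : s.length - 1 = 0 := by omega
    rw [h0, fcspLoop]
    simp
  · push Not at h2
    rw [fcspLoop_eq_fold, List.range_eq_range',
      show List.range' 0 (s.length - 1) = List.range' 0 (s.length - 1 - 0) by rw [Nat.sub_zero],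
      alt_eq_fold]
    set m0 : Int := s.getD 0 0 + s.getD (s.length - 1) 0 with hm0
    set st0 : Int × (Int × Int) := (m0, (s.getD 0 0, s.getD (s.length - 1) 0)) with hst0
    have hijd_ne : pvIjd s.length 0 ≠ [] := by
      intro hnil
      have : (0, s.length - 1) ∈ pvIjd s.length 0 := (mem_pvIjd _ _ _).2 (by simp; omega)
      rw [hnil] at this
      exact List.not_mem_nil this
    obtain ⟨L1, P, L2, heq, hminL, hpreL⟩ := firstmin_exists s (pvIjd s.length 0) hijd_ne
    have hPmem : P ∈ pvIjd s.length 0 := by rw [heq]; exact List.mem_append_right _ (List.mem_cons_self ..)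
    have hPb := (mem_pvIjd _ _ _).1 hPmem
    have hmin : ∀ q : Nat × Nat, 0 ≤ q.1 → q.1 < q.2 → q.2 ≤ s.length - 1 → pvA s P ≤ pvA s q :=
      fun q _ hq2 hq3 => hminL q ((mem_pvIjd _ _ _).2 ⟨Nat.zero_le _, hq2, hq3⟩)
    have hpw := pairwise_pvIjd s.length 0
    rw [heq] at hpw
    have hsuffLT : ∀ q ∈ L2, pvLT P q :=
      (List.pairwise_cons.1 (List.pairwise_append.1 hpw).2.1).1
    have hfirst : ∀ q : Nat × Nat, 0 ≤ q.1 → q.1 < q.2 → q.2 ≤ s.length - 1 → pvLT q P →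
        pvA s P < pvA s q := by
      intro q _ hq2 hq3 hq4
      have hqmem : q ∈ pvIjd s.length 0 := (mem_pvIjd _ _ _).2 ⟨Nat.zero_le _, hq2, hq3⟩
      rw [heq] at hqmem
      rcases List.mem_append.1 hqmem with hq | hq
      · exact hpreL q hq
      · rcases List.mem_cons.1 hq with rfl | hq
        · exfalso; unfold pvLT at hq4; omega
        · exfalso
          have := hsuffLT q hq
          unfold pvLT at hq4 this; omega
    by_cases hM : pvA s P < st0.1.natAbs
    · obtain ⟨K1, K2, hpath, hKpre⟩ := tiebreak s hs P hPb.2.1 0 (s.length - 1)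
        (Nat.zero_le _) hPb.2.2 (le_refl _) h2 hmin hfirst
      have hK2 : ∀ q ∈ K2, pvA s P ≤ pvA s q := by
        intro q hq
        have hqp : q ∈ pvPath s 0 (s.length - 1) := by
          rw [hpath]; exact List.mem_append_right _ (List.mem_cons_of_mem _ hq)
        have := mem_pvPath s _ _ q hqp
        exact hmin q this.1 this.2.1 this.2.2
      have hL2 : ∀ q ∈ L2, pvA s P ≤ pvA s q := by
        intro q hq
        exact hminL q (by rw [heq]; exact List.mem_append_right _ (List.mem_cons_of_mem _ hq))
      rw [hpath, heq, fold_firstmin s K1 K2 P st0 hKpre hM hK2,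
        fold_firstmin s L1 L2 P st0 hpreL hM hL2]
    · push Not at hM
      rw [fold_no_update, fold_no_update]
      · intro q hq
        have := hminL q hq
        omega
      · intro q hq
        have hb := mem_pvPath s _ _ q hq
        have := hmin q hb.1 hb.2.1 hb.2.2
        omega

-- ===== VERDICT (by name: the statement is the Claim_ definition above) =====
theorem find_closest_sum_pair_spec : Claim_equal_find_closest_sum_pair := by
  intro arr _ _
  have hs := PySem.List.sorted_pairwise (xs := arr) (key := fun x : Int => x)
  unfold Spec_find_closest_sum_pair find_closest_sum_pair find_closest_sum_pair_alt
  simpa using main_sorted _ hs
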